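-- pv_equiv track=rewrite | github.com/robertothais/breakwater | src/breakwater/catalog/stats.py | analyze_software_distribution
-- ===== SOURCE A (Python) =====
-- from collections import Counter
--
-- def analyze_software_distribution(software_usage: Counter[str]) -> dict[str, int]:
--     """Analyze the distribution of software usage (single use, few uses, popular)."""
--     total_software = len(software_usage)
--     used_once = sum(1 for count in software_usage.values() if count == 1)
--     used_2_to_5 = sum(1 for count in software_usage.values() if 2 <= count <= 5)
--     used_more_than_5 = sum(1 for count in software_usage.values() if count > 5)
--
--     return {
--         "total_software": total_software,
--         "used_once": used_once,
--         "used_2_to_5": used_2_to_5,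
--         "used_more_than_5": used_more_than_5,
--     }
-- ===== SOURCE B (Python) =====
-- def analyze_software_distribution(software_usage):
--     """Analyze the distribution of software usage (single use, few uses, popular)."""
--     values = sorted(software_usage.values())
--     n = len(values)
--
--     def bisect_left(x):
--         # first index whose value is >= x in the sorted list
--         lo, hi = 0, n
--         while lo < hi:
--             mid = (lo + hi) // 2
--             if values[mid] < x:
--                 lo = mid + 1
--             else:
--                 hi = mid
--         return lo
--
--     lo1 = bisect_left(1)
--     lo2 = bisect_left(2)
--     lo6 = bisect_left(6)
--     return {
--         "total_software": n,
--         "used_once": lo2 - lo1,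
--         "used_2_to_5": lo6 - lo2,
--         "used_more_than_5": n - lo6,
--     }
-- ===== Notes on version B (the rewrite author's own statement) =====
-- stated objective: alternative
-- what changed: B sorts the usage counts and locates the bucket boundaries with a hand-written binary search (bisect_left at 1, 2 and 6), turning each bucket size into a difference of boundary positions instead of A's three predicate-counting scans; it trades an O(n log n) sort for the removal of all per-element bucket tests.
import Mathlib
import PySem

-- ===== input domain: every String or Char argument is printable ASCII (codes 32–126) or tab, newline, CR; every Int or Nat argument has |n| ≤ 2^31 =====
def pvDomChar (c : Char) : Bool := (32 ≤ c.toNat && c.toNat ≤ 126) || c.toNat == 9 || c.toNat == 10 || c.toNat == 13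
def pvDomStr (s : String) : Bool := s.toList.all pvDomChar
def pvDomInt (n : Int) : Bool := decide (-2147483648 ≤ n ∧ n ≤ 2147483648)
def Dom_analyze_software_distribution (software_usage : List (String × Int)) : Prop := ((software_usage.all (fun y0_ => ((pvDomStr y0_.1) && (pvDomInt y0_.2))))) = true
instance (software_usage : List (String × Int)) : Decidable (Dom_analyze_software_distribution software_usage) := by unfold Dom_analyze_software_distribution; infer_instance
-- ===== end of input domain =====

-- B sorts the usage counts and reads each bucket size off as a difference of binary-searched boundary positions (alternative algorithm, same result).


-- ===== PORT A =====
-- A: three separate conditional-count scans (the generator-expression sums) over the values, plus len.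
def pvA_once (acc : Int) (p : String × Int) : Int := if p.2 == 1 then acc + 1 else acc
def pvA_2to5 (acc : Int) (p : String × Int) : Int := if 2 ≤ p.2 && p.2 ≤ 5 then acc + 1 else acc
def pvA_more5 (acc : Int) (p : String × Int) : Int := if p.2 > 5 then acc + 1 else acc

def analyze_software_distribution (software_usage : List (String × Int)) : List (String × Int) :=
  let total_software : Int := software_usage.length
  let used_once : Int := software_usage.foldl pvA_once 0
  let used_2_to_5 : Int := software_usage.foldl pvA_2to5 0
  let used_more_than_5 : Int := software_usage.foldl pvA_more5 0
  [("total_software", total_software), ("used_once", used_once),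
   ("used_2_to_5", used_2_to_5), ("used_more_than_5", used_more_than_5)]

-- ===== PORT B =====
-- B: hand-written bisect_left loop from Source B (the 'while lo < hi' loop, step for step).
-- values[mid] is ported as getD mid 0: the loop keeps 0 ≤ lo ≤ mid < hi ≤ len, so the index is
-- always in range and the default is never used (exact there).
def pvBisectLeft (values : List Int) (x : Int) (lo hi : Nat) : Nat :=
  if _h : lo < hi then
    let mid := (lo + hi) / 2
    if values.getD mid 0 < x then pvBisectLeft values x (mid + 1) hi
    else pvBisectLeft values x lo mid
  else lo
termination_by hi - lo
decreasing_by all_goals omega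

def analyze_software_distribution_alt (software_usage : List (String × Int)) : List (String × Int) :=
  let values := PySem.List.sorted (software_usage.map Prod.snd) (fun v => v)
  let n := values.length
  let lo1 := pvBisectLeft values 1 0 n
  let lo2 := pvBisectLeft values 2 0 n
  let lo6 := pvBisectLeft values 6 0 n
  [("total_software", (n : Int)), ("used_once", (lo2 : Int) - (lo1 : Int)),
   ("used_2_to_5", (lo6 : Int) - (lo2 : Int)), ("used_more_than_5", (n : Int) - (lo6 : Int))]

-- ===== PRECONDITION & SPEC =====
def Spec_analyze_software_distribution (software_usage : List (String × Int)) (out : List (String × Int)) : Prop := out = analyze_software_distribution_alt software_usage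
instance (software_usage : List (String × Int)) (out : List (String × Int)) : Decidable (Spec_analyze_software_distribution software_usage out) := by unfold Spec_analyze_software_distribution; infer_instance

-- ===== CLAIM (what is proved, stated in full; the proofs are below) =====
def Claim_equal_analyze_software_distribution : Prop := ∀ (software_usage : List (String × Int)), Dom_analyze_software_distribution software_usage → Spec_analyze_software_distribution software_usage (analyze_software_distribution software_usage)

-- ===== LEMMAS AND PROOFS =====

-- On a sorted list an element < x forces the whole prefix up to it below x.
theorem countP_lt_ge (l : List Int) (x : Int) (hs : l.Pairwise (· ≤ ·)) (m : Nat)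
    (hm : m < l.length) (hx : l[m] < x) :
    m + 1 ≤ l.countP (fun a => decide (a < x)) := by
  have hpw := List.pairwise_iff_getElem.mp hs
  have hall : ∀ a ∈ l.take (m + 1), (fun a => decide (a < x)) a = true := by
    intro a ha
    obtain ⟨j, hj, rfl⟩ := List.mem_iff_getElem.mp ha
    rw [List.getElem_take]
    have hjl : j < l.length := by
      have := hj; rw [List.length_take] at this; omega
    have hle : l[j] ≤ l[m] := by
      rcases Nat.lt_or_ge j m with h | h
      · exact hpw j m hjl hm h
      · have hjm : j ≤ m := by
          have := hj; rw [List.length_take] at this; omega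
        have : j = m := by omega
        subst this; exact le_refl _
    simp only [decide_eq_true_eq]
    omega
  have h1 : (l.take (m + 1)).countP (fun a => decide (a < x)) = m + 1 := by
    rw [List.countP_eq_length.mpr hall, List.length_take]
    omega
  have h2 : l.countP (fun a => decide (a < x))
      = (l.take (m + 1)).countP (fun a => decide (a < x))
        + (l.drop (m + 1)).countP (fun a => decide (a < x)) := by
    conv_lhs => rw [← List.take_append_drop (m + 1) l]
    rw [List.countP_append]
  omega

theorem countP_lt_le (l : List Int) (x : Int) (hs : l.Pairwise (· ≤ ·)) (m : Nat)
    (hm : m < l.length) (hx : ¬ l[m] < x) :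
    l.countP (fun a => decide (a < x)) ≤ m := by
  have hpw := List.pairwise_iff_getElem.mp hs
  have hzero : (l.drop m).countP (fun a => decide (a < x)) = 0 := by
    rw [List.countP_eq_zero]
    intro a ha
    obtain ⟨j, hj, rfl⟩ := List.mem_iff_getElem.mp ha
    rw [List.getElem_drop]
    have hjl : m + j < l.length := by
      have := hj; rw [List.length_drop] at this; omega
    have hge : l[m] ≤ l[m + j] := by
      rcases Nat.eq_zero_or_pos j with h | h
      · subst h; simp
      · exact hpw m (m + j) hm hjl (by omega)
    simp only [decide_eq_true_eq]
    omega
  have h2 : l.countP (fun a => decide (a < x))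
      = (l.take m).countP (fun a => decide (a < x))
        + (l.drop m).countP (fun a => decide (a < x)) := by
    conv_lhs => rw [← List.take_append_drop m l]
    rw [List.countP_append]
  have h3 : (l.take m).countP (fun a => decide (a < x)) ≤ (l.take m).length :=
    List.countP_le_length
  rw [List.length_take] at h3
  omega

-- The bisect loop computes the count of elements below x on a sorted list.
theorem pvBisectLeft_eq_countP (l : List Int) (x : Int) (hs : l.Pairwise (· ≤ ·)) :
    pvBisectLeft l x 0 l.length = l.countP (fun a => decide (a < x)) := by
  have key : ∀ (d lo hi : Nat), hi - lo ≤ d → hi ≤ l.length →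
      lo ≤ l.countP (fun a => decide (a < x)) → l.countP (fun a => decide (a < x)) ≤ hi →
      pvBisectLeft l x lo hi = l.countP (fun a => decide (a < x)) := by
    intro d
    induction d with
    | zero =>
      intro lo hi hd hlen hlo hhi
      rw [pvBisectLeft, dif_neg (by omega)]
      omega
    | succ d ih =>
      intro lo hi hd hlen hlo hhi
      by_cases hlh : lo < hi
      · rw [pvBisectLeft, dif_pos hlh]
        simp only []
        have hm : (lo + hi) / 2 < l.length := by omega
        by_cases hc : l.getD ((lo + hi) / 2) 0 < x
        · rw [if_pos hc]
          have hx : l[(lo + hi) / 2] < x := by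
            rwa [List.getD_eq_getElem l 0 hm] at hc
          exact ih ((lo + hi) / 2 + 1) hi (by omega) hlen
            (countP_lt_ge l x hs _ hm hx) hhi
        · rw [if_neg hc]
          have hx : ¬ l[(lo + hi) / 2] < x := by
            rwa [List.getD_eq_getElem l 0 hm] at hc
          exact ih lo ((lo + hi) / 2) (by omega) (by omega) hlo
            (countP_lt_le l x hs _ hm hx)
      · rw [pvBisectLeft, dif_neg hlh]
        omega
  exact key l.length 0 l.length (by omega) (le_refl _) (Nat.zero_le _)
    (List.countP_le_length)

-- A's fold counters as countP values.
theorem foldl_once (l : List (String × Int)) (a : Int) :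
    l.foldl pvA_once a = a + (l.countP (fun p => decide (p.2 = 1)) : Int) := by
  induction l generalizing a with
  | nil => simp
  | cons h t ih =>
    simp only [List.foldl, List.countP_cons, pvA_once]
    rw [ih]
    by_cases hc : h.2 = 1 <;> simp [hc] <;> omega

theorem foldl_2to5 (l : List (String × Int)) (a : Int) :
    l.foldl pvA_2to5 a = a + (l.countP (fun p => decide (2 ≤ p.2 ∧ p.2 ≤ 5)) : Int) := by
  induction l generalizing a with
  | nil => simp
  | cons h t ih =>
    simp only [List.foldl, List.countP_cons, pvA_2to5]
    rw [ih]
    by_cases hc : 2 ≤ h.2 ∧ h.2 ≤ 5 <;> simp [hc] <;> omega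

theorem foldl_more5 (l : List (String × Int)) (a : Int) :
    l.foldl pvA_more5 a = a + (l.countP (fun p => decide (5 < p.2)) : Int) := by
  induction l generalizing a with
  | nil => simp
  | cons h t ih =>
    simp only [List.foldl, List.countP_cons, pvA_more5, gt_iff_lt]
    rw [ih]
    by_cases hc : 5 < h.2 <;> simp [hc] <;> omega

-- Bucket arithmetic on the counts, per element.
theorem countP_split1 (l : List (String × Int)) :
    l.countP (fun p => decide (p.2 < 2))
      = l.countP (fun p => decide (p.2 < 1)) + l.countP (fun p => decide (p.2 = 1)) := by
  induction l with
  | nil => rfl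
  | cons h t ih =>
    simp only [List.countP_cons, ih]
    by_cases h1 : h.2 < 1 <;> by_cases h2 : h.2 = 1 <;> by_cases h3 : h.2 < 2 <;>
      simp [h1, h2, h3] <;> omega

theorem countP_split2 (l : List (String × Int)) :
    l.countP (fun p => decide (p.2 < 6))
      = l.countP (fun p => decide (p.2 < 2)) + l.countP (fun p => decide (2 ≤ p.2 ∧ p.2 ≤ 5)) := by
  induction l with
  | nil => rfl
  | cons h t ih =>
    simp only [List.countP_cons, ih]
    by_cases h1 : h.2 < 2 <;> by_cases h2 : 2 ≤ h.2 ∧ h.2 ≤ 5 <;> by_cases h3 : h.2 < 6 <;>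
      simp [h1, h2, h3] <;> omega

theorem countP_split3 (l : List (String × Int)) :
    l.length = l.countP (fun p => decide (p.2 < 6)) + l.countP (fun p => decide (5 < p.2)) := by
  induction l with
  | nil => rfl
  | cons h t ih =>
    simp only [List.countP_cons, List.length_cons, ih]
    by_cases h1 : h.2 < 6 <;> by_cases h2 : 5 < h.2 <;> simp [h1, h2] <;> omega

-- The boundary position found on the sorted values equals a countP over the original pairs.
theorem lo_eq (l : List (String × Int)) (x : Int) :
    pvBisectLeft (PySem.List.sorted (l.map Prod.snd) (fun v => v)) x 0
        (PySem.List.sorted (l.map Prod.snd) (fun v => v)).length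
      = l.countP (fun p => decide (p.2 < x)) := by
  set vs := PySem.List.sorted (l.map Prod.snd) (fun v => v) with hv
  have hs : vs.Pairwise (· ≤ ·) := by
    simpa using PySem.List.sorted_pairwise (l.map Prod.snd) (fun v => v)
  rw [pvBisectLeft_eq_countP vs x hs]
  have hp : vs.Perm (l.map Prod.snd) := PySem.List.sorted_perm _ _ _
  rw [hp.countP_eq, List.countP_map]
  rfl

-- ===== VERDICT (by name: the statement is the Claim_ definition above) =====
theorem analyze_software_distribution_spec : Claim_equal_analyze_software_distribution := by
  intro l _
  unfold Spec_analyze_software_distribution analyze_software_distribution analyze_software_distribution_alt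
  simp only [foldl_once, foldl_2to5, foldl_more5, lo_eq]
  have e1 := countP_split1 l
  have e2 := countP_split2 l
  have e3 := countP_split3 l
  have hlen : (PySem.List.sorted (l.map Prod.snd) (fun v => v)).length = l.length := by
    rw [(PySem.List.sorted_perm (l.map Prod.snd) (fun v => v) false).length_eq, List.length_map]
  simp only [hlen, List.cons.injEq, Prod.mk.injEq]
  refine ⟨trivial, ⟨trivial, ?_⟩, ⟨trivial, ?_⟩, ⟨trivial, ?_⟩, trivial⟩ <;> omega
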